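-- pv_equiv track=rewrite | github.com/parktaejun-dev/kobaco-addr | backend/api/recommender.py | _get_priority_segments
-- ===== SOURCE A (Python) =====
-- from typing import List, Dict
--
-- def _get_priority_segments(expanded_keywords: List[str], all_segments_info: List[Dict]) -> (List[Dict], List[Dict]):
--     if not expanded_keywords: return [], all_segments_info
--     priority_segments, remaining_segments = [], []
--     priority_names = set()
--     lower_keywords = [kw.lower() for kw in expanded_keywords if kw and len(kw) > 1]
--     if not lower_keywords: return [], all_segments_info
--
--     for segment in all_segments_info:
--         search_text = f"{segment.get('name', '')} {segment.get('description', '')} {segment.get('recommended_advertisers', '')}".lower()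
--         found = any(keyword in search_text for keyword in lower_keywords)
--         if found and segment.get('name') not in priority_names:
--             priority_segments.append(segment)
--             priority_names.add(segment.get('name'))
--         else:
--             remaining_segments.append(segment)
--     return priority_segments, remaining_segments
-- ===== SOURCE B (Python) =====
-- from typing import List, Dict
--
-- def _get_priority_segments(expanded_keywords: List[str], all_segments_info: List[Dict]) -> (List[Dict], List[Dict]):
--     keywords = [kw.lower() for kw in expanded_keywords if kw and len(kw) > 1]
--     if not keywords:
--         return [], all_segments_info
--
--     texts = [' '.join((seg.get('name', ''), seg.get('description', ''), seg.get('recommended_advertisers', ''))).lower()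
--              for seg in all_segments_info]
--
--     # keyword-outer matching: one hit-flag sweep over all texts per keyword
--     hit = [False] * len(texts)
--     for kw in keywords:
--         hit = [h or kw in t for t, h in zip(texts, hit)]
--
--     # tag each segment (hit and name not already taken), then partition by tag
--     tags, seen = [], set()
--     for seg, h in zip(all_segments_info, hit):
--         take = h and seg.get('name') not in seen
--         if take:
--             seen.add(seg.get('name'))
--         tags.append(take)
--     priority = [seg for seg, t in zip(all_segments_info, tags) if t]
--     remaining = [seg for seg, t in zip(all_segments_info, tags) if not t]
--     return priority, remaining
-- ===== Notes on version B (the rewrite author's own statement) =====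
-- stated objective: alternative
-- what changed: Inverted loop nesting: B precomputes all search texts once, then sweeps a hit-flag list once per keyword (keyword-outer) and finally tags and partitions via zip comprehensions, instead of A's single segment-outer pass that tries every keyword per segment and appends to two accumulator lists.
import Mathlib
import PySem

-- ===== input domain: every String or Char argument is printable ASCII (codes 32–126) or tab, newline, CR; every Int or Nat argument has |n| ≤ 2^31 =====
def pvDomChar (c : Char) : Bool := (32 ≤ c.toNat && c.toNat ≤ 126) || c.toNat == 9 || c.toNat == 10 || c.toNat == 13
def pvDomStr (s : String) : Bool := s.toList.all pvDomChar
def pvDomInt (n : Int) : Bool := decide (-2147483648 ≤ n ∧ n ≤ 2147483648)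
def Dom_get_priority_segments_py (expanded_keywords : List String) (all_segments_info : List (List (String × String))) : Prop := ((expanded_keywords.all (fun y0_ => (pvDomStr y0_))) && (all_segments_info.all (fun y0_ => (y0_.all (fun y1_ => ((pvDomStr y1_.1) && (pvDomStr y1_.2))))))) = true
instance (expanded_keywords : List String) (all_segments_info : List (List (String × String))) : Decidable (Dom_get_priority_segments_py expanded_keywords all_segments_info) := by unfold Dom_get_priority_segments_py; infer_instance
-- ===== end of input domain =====

-- B inverts A's loop nesting (precomputed texts, one hit-flag sweep per keyword, then a
-- tag-then-partition phase) instead of A's single segment-outer pass (objective: alternative).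

-- ===== PORT A =====
-- f-string "{a} {b} {c}".lower() ported on List Char with list append (exact; PySem.Chars.lower is Python's str.lower)
def pvA_text (segment : List (String × String)) : List Char :=
  PySem.Chars.lower
    ((PySem.Dict.getD (PySem.Dict.mk segment) "name" "").toList ++
      ' ' :: (PySem.Dict.getD (PySem.Dict.mk segment) "description" "").toList ++
      ' ' :: (PySem.Dict.getD (PySem.Dict.mk segment) "recommended_advertisers" "").toList)

def get_priority_segments_py (expanded_keywords : List String) (all_segments_info : List (List (String × String))) : (List (List (String × String))) × (List (List (String × String))) :=
  if expanded_keywords = [] then ([], all_segments_info) else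
  let lower_keywords := (expanded_keywords.filter (fun kw => kw != "" && decide (1 < PySem.Str.len kw))).map PySem.Str.lower
  if lower_keywords = [] then ([], all_segments_info) else
  let res := all_segments_info.foldl
    (fun (st : List (List (String × String)) × List (List (String × String)) × PySem.Set (Option String)) segment =>
      let found := lower_keywords.any (fun keyword => PySem.Chars.isIn keyword.toList (pvA_text segment))
      if found && !(PySem.Set.contains st.2.2 ((PySem.Dict.mk segment).get? "name")) then
        (st.1 ++ [segment], st.2.1, PySem.Set.add st.2.2 ((PySem.Dict.mk segment).get? "name"))
      else
        (st.1, st.2.1 ++ [segment], st.2.2))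
    ([], [], PySem.Set.empty)
  (res.1, res.2.1)

-- ===== PORT B =====
-- ' '.join((name, description, advertisers)).lower()
def pvB_text (seg : List (String × String)) : List Char :=
  (PySem.Str.lower (PySem.Str.join " "
    [PySem.Dict.getD (PySem.Dict.mk seg) "name" "",
     PySem.Dict.getD (PySem.Dict.mk seg) "description" "",
     PySem.Dict.getD (PySem.Dict.mk seg) "recommended_advertisers" ""])).toList

def get_priority_segments_py_alt (expanded_keywords : List String) (all_segments_info : List (List (String × String))) : (List (List (String × String))) × (List (List (String × String))) :=
  let keywords := (expanded_keywords.filter (fun kw => kw != "" && decide (1 < PySem.Str.len kw))).map PySem.Str.lower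
  if keywords = [] then ([], all_segments_info) else
  let texts := all_segments_info.map (fun seg => pvB_text seg)
  -- hit = [h or kw in t for t, h in zip(texts, hit)], rebound per keyword
  let hit := keywords.foldl
    (fun hit kw => (texts.zip hit).map (fun p => p.2 || PySem.Chars.isIn kw.toList p.1))
    (List.replicate texts.length false)
  let tags := ((all_segments_info.zip hit).foldl
    (fun (st : List Bool × PySem.Set (Option String)) p =>
      let take := p.2 && !(PySem.Set.contains st.2 ((PySem.Dict.mk p.1).get? "name"))
      (st.1 ++ [take], if take then PySem.Set.add st.2 ((PySem.Dict.mk p.1).get? "name") else st.2))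
    ([], PySem.Set.empty)).1
  (((all_segments_info.zip tags).filter (fun p => p.2)).map Prod.fst,
   ((all_segments_info.zip tags).filter (fun p => !p.2)).map Prod.fst)

-- ===== PRECONDITION & SPEC =====
def Spec_get_priority_segments_py (expanded_keywords : List String) (all_segments_info : List (List (String × String))) (out : (List (List (String × String))) × (List (List (String × String)))) : Prop := out = get_priority_segments_py_alt expanded_keywords all_segments_info
instance (expanded_keywords : List String) (all_segments_info : List (List (String × String))) (out : (List (List (String × String))) × (List (List (String × String)))) : Decidable (Spec_get_priority_segments_py expanded_keywords all_segments_info out) := by unfold Spec_get_priority_segments_py; infer_instance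

-- ===== CLAIM (what is proved, stated in full; the proofs are below) =====
def Claim_equal_get_priority_segments_py : Prop := ∀ (expanded_keywords : List String) (all_segments_info : List (List (String × String))), Dom_get_priority_segments_py expanded_keywords all_segments_info → Spec_get_priority_segments_py expanded_keywords all_segments_info (get_priority_segments_py expanded_keywords all_segments_info)

-- ===== LEMMAS AND PROOFS =====

lemma pv_text_eq (seg : List (String × String)) : pvB_text seg = pvA_text seg := by
  simp [pvB_text, pvA_text, PySem.Str.join, PySem.Chars.join, List.intercalate,
    PySem.Str.lower, PySem.Chars.lower]

-- the tag A and B both compute for one segment against the current seen-set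
def pvTag (kws : List String) (seg : List (String × String)) (seen : PySem.Set (Option String)) : Bool :=
  kws.any (fun kw => PySem.Chars.isIn kw.toList (pvB_text seg)) &&
    !(PySem.Set.contains seen ((PySem.Dict.mk seg).get? "name"))

-- recursive characterisation of the common result (priority, remaining, final seen-set)
def pvGold (kws : List String) : List (List (String × String)) → PySem.Set (Option String) →
    (List (List (String × String))) × (List (List (String × String))) × PySem.Set (Option String)
  | [], seen => ([], [], seen)
  | seg :: rest, seen =>
    if pvTag kws seg seen then
      let g := pvGold kws rest (PySem.Set.add seen ((PySem.Dict.mk seg).get? "name"))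
      (seg :: g.1, g.2.1, g.2.2)
    else
      let g := pvGold kws rest seen
      (g.1, seg :: g.2.1, g.2.2)

def pvTags (kws : List String) : List (List (String × String)) → PySem.Set (Option String) → List Bool
  | [], _ => []
  | seg :: rest, seen =>
    pvTag kws seg seen ::
      pvTags kws rest (if pvTag kws seg seen then PySem.Set.add seen ((PySem.Dict.mk seg).get? "name") else seen)

lemma pv_foldA (kws : List String) (segs : List (List (String × String)))
    (p r : List (List (String × String))) (seen : PySem.Set (Option String)) :
    segs.foldl
      (fun (st : List (List (String × String)) × List (List (String × String)) × PySem.Set (Option String)) segment =>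
        let found := kws.any (fun keyword => PySem.Chars.isIn keyword.toList (pvA_text segment))
        if found && !(PySem.Set.contains st.2.2 ((PySem.Dict.mk segment).get? "name")) then
          (st.1 ++ [segment], st.2.1, PySem.Set.add st.2.2 ((PySem.Dict.mk segment).get? "name"))
        else
          (st.1, st.2.1 ++ [segment], st.2.2)) (p, r, seen)
    = (p ++ (pvGold kws segs seen).1, r ++ (pvGold kws segs seen).2.1, (pvGold kws segs seen).2.2) := by
  induction segs generalizing p r seen with
  | nil => simp [pvGold]
  | cons seg rest ih =>
    have htag : (kws.any (fun keyword => PySem.Chars.isIn keyword.toList (pvA_text seg))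
        && !(PySem.Set.contains seen ((PySem.Dict.mk seg).get? "name"))) = pvTag kws seg seen := by
      simp [pvTag, pv_text_eq]
    by_cases h : pvTag kws seg seen = true
    · simp only [List.foldl_cons, htag, h, if_pos, pvGold, ih]
      simp [pvGold, h]
    · simp only [List.foldl_cons, htag, Bool.not_eq_true] at *
      simp only [List.foldl_cons, htag, h, if_neg, pvGold, ih]
      simp [pvGold, h]

-- the keyword-outer hit sweep computes, per text, "some keyword occurs"
lemma pv_hit (kws : List String) (texts : List (List Char)) (g : List Char → Bool) :
    kws.foldl
      (fun hit kw => (texts.zip hit).map (fun p => p.2 || PySem.Chars.isIn kw.toList p.1))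
      (texts.map g)
    = texts.map (fun t => g t || kws.any (fun kw => PySem.Chars.isIn kw.toList t)) := by
  induction kws generalizing g with
  | nil => simp
  | cons kw rest ih =>
    have hstep : (texts.zip (texts.map g)).map (fun p => p.2 || PySem.Chars.isIn kw.toList p.1)
        = texts.map (fun t => g t || PySem.Chars.isIn kw.toList t) := by
      rw [← List.map_prod_left_eq_zip, List.map_map]
      rfl
    rw [List.foldl_cons, hstep, ih (fun t => g t || PySem.Chars.isIn kw.toList t)]
    apply List.map_congr_left
    intro t _
    simp [Bool.or_assoc]

lemma pv_foldB (kws : List String) (segs : List (List (String × String)))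
    (acc : List Bool) (seen : PySem.Set (Option String)) :
    ((segs.map (fun seg => (seg, kws.any (fun kw => PySem.Chars.isIn kw.toList (pvB_text seg))))).foldl
      (fun (st : List Bool × PySem.Set (Option String)) p =>
        let take := p.2 && !(PySem.Set.contains st.2 ((PySem.Dict.mk p.1).get? "name"))
        (st.1 ++ [take], if take then PySem.Set.add st.2 ((PySem.Dict.mk p.1).get? "name") else st.2)) (acc, seen))
    = (acc ++ pvTags kws segs seen, (pvGold kws segs seen).2.2) := by
  induction segs generalizing acc seen with
  | nil => simp [pvTags, pvGold]
  | cons seg rest ih =>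
    have ht : (kws.any (fun kw => PySem.Chars.isIn kw.toList (pvB_text seg))
        && !(PySem.Set.contains seen ((PySem.Dict.mk seg).get? "name"))) = pvTag kws seg seen := rfl
    by_cases h : pvTag kws seg seen = true
    · simp only [List.map_cons, List.foldl_cons, ht, h, if_pos, ih]
      simp [pvTags, pvGold, h]
    · simp only [List.map_cons, List.foldl_cons, ht, Bool.not_eq_true] at *
      simp only [List.map_cons, List.foldl_cons, ht, h, if_neg, ih]
      simp [pvTags, pvGold, h]

lemma pv_zip_prio (kws : List String) (segs : List (List (String × String))) (seen : PySem.Set (Option String)) :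
    ((segs.zip (pvTags kws segs seen)).filter (fun p => p.2)).map Prod.fst = (pvGold kws segs seen).1 := by
  induction segs generalizing seen with
  | nil => simp [pvTags, pvGold]
  | cons seg rest ih =>
    by_cases h : pvTag kws seg seen = true <;>
      simp [pvTags, pvGold, h, ih]

lemma pv_zip_rem (kws : List String) (segs : List (List (String × String))) (seen : PySem.Set (Option String)) :
    ((segs.zip (pvTags kws segs seen)).filter (fun p => !p.2)).map Prod.fst = (pvGold kws segs seen).2.1 := by
  induction segs generalizing seen with
  | nil => simp [pvTags, pvGold]
  | cons seg rest ih =>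
    by_cases h : pvTag kws seg seen = true <;>
      simp [pvTags, pvGold, h, ih]

-- ===== VERDICT (by name: the statement is the Claim_ definition above) =====
theorem get_priority_segments_py_spec : Claim_equal_get_priority_segments_py := by
  intro ek asi _
  unfold Spec_get_priority_segments_py get_priority_segments_py get_priority_segments_py_alt
  by_cases hek : ek = []
  · simp [hek]
  · simp only [if_neg hek]
    set kws := (ek.filter (fun kw => kw != "" && decide (1 < PySem.Str.len kw))).map PySem.Str.lower with hk
    by_cases hkw : kws = []
    · simp [hkw]
    · have hrep : List.replicate (asi.map (fun seg => pvB_text seg)).length false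
          = (asi.map (fun seg => pvB_text seg)).map (fun _ => false) := by
        simp [List.map_const']
      have hzip : asi.zip ((asi.map (fun seg => pvB_text seg)).map
            (fun t => false || kws.any (fun kw => PySem.Chars.isIn kw.toList t)))
          = asi.map (fun seg => (seg, kws.any (fun kw => PySem.Chars.isIn kw.toList (pvB_text seg)))) := by
        rw [List.map_map, ← List.map_prod_left_eq_zip]
        rfl
      simp only [if_neg hkw, pv_foldA, hrep, pv_hit, hzip, pv_foldB, List.nil_append,
        pv_zip_prio, pv_zip_rem]
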